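-- pv_equiv track=rewrite | github.com/jacobressler123/NatalieSymmetryMap | fancy_symmetry.py | diameterPts
-- ===== SOURCE A (Python) =====
-- def diameterPts(hullPts):
--     diameter = 0
--     diameterPts = []
--     for i in range(len(hullPts) - 1):
--         for j in range(len(hullPts) - i - 1):
--             distance2d = abs(hullPts[i][0] - hullPts[i + j + 1][0])
--             if distance2d > diameter:
--                 diameter = distance2d
--                 diameterPts = [hullPts[i], hullPts[i + j + 1]]
--     return diameter, diameterPts
-- ===== SOURCE B (Python) =====
-- def diameterPts(hullPts):
--     # O(n): the max |x_i - x_j| is max(x)-min(x); the recorded pair is the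
--     # lexicographically first pair attaining it, found by two linear scans.
--     if len(hullPts) < 2:
--         return 0, []
--     xs = [p[0] for p in hullPts]
--     lo = min(xs)
--     hi = max(xs)
--     d = hi - lo
--     if d == 0:
--         return 0, []
--     i = next(k for k, x in enumerate(xs) if x == lo or x == hi)
--     other = hi if xs[i] == lo else lo
--     j = next(k for k in range(i + 1, len(xs)) if xs[k] == other)
--     return d, [hullPts[i], hullPts[j]]
-- ===== Notes on version B (the rewrite author's own statement) =====
-- stated objective: faster
-- what changed: Replaced the O(n^2) all-pairs scan with a closed form: the max |x_i-x_j| equals max(x)-min(x), and the lexicographically first attaining pair is found by two linear scans (first extreme index, then first complementary extreme after it).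
import Mathlib
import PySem

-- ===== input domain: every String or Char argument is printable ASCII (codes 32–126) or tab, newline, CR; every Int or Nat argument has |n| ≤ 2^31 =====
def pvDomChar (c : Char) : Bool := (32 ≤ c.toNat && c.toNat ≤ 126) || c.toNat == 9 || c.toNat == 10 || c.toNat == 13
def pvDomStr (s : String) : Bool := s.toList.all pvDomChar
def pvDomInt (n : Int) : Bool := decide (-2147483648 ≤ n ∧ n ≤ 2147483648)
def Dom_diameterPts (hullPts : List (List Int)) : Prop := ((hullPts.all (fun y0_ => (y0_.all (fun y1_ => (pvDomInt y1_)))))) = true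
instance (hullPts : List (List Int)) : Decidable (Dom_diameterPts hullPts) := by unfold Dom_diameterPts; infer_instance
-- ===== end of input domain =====

-- B replaces A's O(n^2) all-pairs scan by a closed form (max x-diff = max x - min x)
-- plus two linear scans for the lexicographically first attaining pair; return value only.

-- ===== PORT A =====
def diameterPts (hullPts : List (List Int)) : Int × List (List Int) :=
  (PySem.List.pyRange 0 ((hullPts.length : Int) - 1) 1).foldl (fun s i =>
    (PySem.List.pyRange 0 ((hullPts.length : Int) - i - 1) 1).foldl (fun s j =>
      let distance2d : Int :=
        |(PySem.List.pyGet? ((PySem.List.pyGet? hullPts i).getD []) 0).getD 0 -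
          (PySem.List.pyGet? ((PySem.List.pyGet? hullPts (i + j + 1)).getD []) 0).getD 0|
      if s.1 < distance2d then
        (distance2d,
          [(PySem.List.pyGet? hullPts i).getD [], (PySem.List.pyGet? hullPts (i + j + 1)).getD []])
      else s) s) (0, [])

-- ===== PORT B =====
def diameterPts_alt (hullPts : List (List Int)) : Int × List (List Int) :=
  if hullPts.length < 2 then (0, [])
  else
    let xs := hullPts.map (fun p => (PySem.List.pyGet? p 0).getD 0)
    let lo := (PySem.List.min? xs (fun x => x)).getD 0
    let hi := (PySem.List.max? xs (fun x => x)).getD 0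
    let d := hi - lo
    if d = 0 then (0, [])
    else
      let i := xs.findIdx (fun x => x == lo || x == hi)
      let other := if xs.getD i 0 == lo then hi else lo
      let t := (xs.drop (i + 1)).findIdx (fun x => x == other)
      let j := i + 1 + t
      (d, [hullPts.getD i [], hullPts.getD j []])

-- ===== PRECONDITION & SPEC =====
-- Pre_ excludes exactly the inputs where Python A raises IndexError: an empty point
-- is indexed ([0]) as soon as the list has at least two points.
def Pre_diameterPts (hullPts : List (List Int)) : Prop :=
  hullPts.length ≤ 1 ∨ ∀ p ∈ hullPts, p ≠ []
instance (hullPts : List (List Int)) : Decidable (Pre_diameterPts hullPts) := by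
  unfold Pre_diameterPts; infer_instance
def pvWitness_diameterPts : List (List Int) := [[0, 2], [5, 3], [1, 7]]
def Spec_diameterPts (hullPts : List (List Int)) (out : Int × List (List Int)) : Prop := out = diameterPts_alt hullPts
instance (hullPts : List (List Int)) (out : Int × List (List Int)) : Decidable (Spec_diameterPts hullPts out) := by unfold Spec_diameterPts; infer_instance

-- ===== CLAIM (what is proved, stated in full; the proofs are below) =====
def Claim_equal_diameterPts : Prop := ∀ (hullPts : List (List Int)), Dom_diameterPts hullPts → Pre_diameterPts hullPts → Spec_diameterPts hullPts (diameterPts hullPts)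

-- ===== LEMMAS AND PROOFS =====

-- x-coordinate of the point at Int index m, exactly as port A computes it
def pvXI (hP : List (List Int)) (m : Int) : Int :=
  (PySem.List.pyGet? ((PySem.List.pyGet? hP m).getD []) 0).getD 0

def pvPt (hP : List (List Int)) (m : Int) : List Int := (PySem.List.pyGet? hP m).getD []

def pvF (hP : List (List Int)) (b : Int × Int) : Int := |pvXI hP b.1 - pvXI hP b.2|

def pvG (hP : List (List Int)) (b : Int × Int) : List (List Int) := [pvPt hP b.1, pvPt hP b.2]

def pvPairs (n : Int) : List (Int × Int) :=
  (PySem.List.pyRange 0 (n - 1) 1).flatMap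
    (fun i => (PySem.List.pyRange 0 (n - i - 1) 1).map (fun j => (i, i + j + 1)))

def pvStep {β : Type} (f : β → Int) (g : β → List (List Int))
    (s : Int × List (List Int)) (b : β) : Int × List (List Int) :=
  if s.1 < f b then (f b, g b) else s

def pvMaxf {β : Type} (f : β → Int) (L : List β) (d0 : Int) : Int :=
  L.foldl (fun m b => max m (f b)) d0

lemma pvA_eq (hP : List (List Int)) :
    diameterPts hP = (pvPairs (hP.length : Int)).foldl (pvStep (pvF hP) (pvG hP)) (0, []) := by
  unfold diameterPts pvPairs
  rw [List.foldl_flatMap]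
  simp only [List.foldl_map]
  rfl

lemma pvMaxf_ge_init {β : Type} (f : β → Int) (L : List β) : ∀ d0 : Int, d0 ≤ pvMaxf f L d0 := by
  induction L with
  | nil => intro d0; simp [pvMaxf]
  | cons a t ih =>
    intro d0
    have h := ih (max d0 (f a))
    simp only [pvMaxf, List.foldl_cons] at h ⊢
    exact le_trans (le_max_left _ _) h

lemma pvMaxf_ge_mem {β : Type} (f : β → Int) {L : List β} {b : β} (hb : b ∈ L) :
    ∀ d0 : Int, f b ≤ pvMaxf f L d0 := by
  induction L with
  | nil => cases hb
  | cons a t ih =>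
    intro d0
    rcases List.mem_cons.mp hb with h | h
    · subst h
      have := pvMaxf_ge_init f t (max d0 (f b))
      simp only [pvMaxf, List.foldl_cons] at this ⊢
      exact le_trans (le_max_right _ _) this
    · have := ih h (max d0 (f a))
      simpa [pvMaxf, List.foldl_cons] using this

lemma pvMaxf_le {β : Type} (f : β → Int) {L : List β} {c : Int} :
    ∀ d0 : Int, d0 ≤ c → (∀ b ∈ L, f b ≤ c) → pvMaxf f L d0 ≤ c := by
  induction L with
  | nil => intro d0 h _; simpa [pvMaxf] using h
  | cons a t ih =>
    intro d0 h hall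
    have h1 : max d0 (f a) ≤ c := max_le h (hall a (List.mem_cons_self))
    have := ih (max d0 (f a)) h1 (fun b hb => hall b (List.mem_cons_of_mem _ hb))
    simpa [pvMaxf, List.foldl_cons] using this

lemma pvMaxf_exists {β : Type} (f : β → Int) :
    ∀ (L : List β) (d0 : Int), d0 < pvMaxf f L d0 → ∃ b ∈ L, f b = pvMaxf f L d0 := by
  intro L
  induction L with
  | nil => intro d0 h; simp [pvMaxf] at h
  | cons a t ih =>
    intro d0 h
    have hstep : pvMaxf f (a :: t) d0 = pvMaxf f t (max d0 (f a)) := by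
      simp [pvMaxf, List.foldl_cons]
    by_cases hm : max d0 (f a) < pvMaxf f t (max d0 (f a))
    · obtain ⟨b, hb, he⟩ := ih (max d0 (f a)) hm
      exact ⟨b, List.mem_cons_of_mem _ hb, by rw [hstep, he]⟩
    · have heq : pvMaxf f t (max d0 (f a)) = max d0 (f a) :=
        le_antisymm (not_lt.mp hm) (pvMaxf_ge_init f t _)
      refine ⟨a, List.mem_cons_self, ?_⟩
      rw [hstep, heq]
      rw [hstep, heq] at h
      omega

lemma pvFind_cons_pos {α : Type} {p : α → Bool} {a : α} (l : List α) (h : p a = true) :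
    (a :: l).find? p = some a := by
  simp [List.find?, h]

lemma pvFind_cons_neg {α : Type} {p : α → Bool} {a : α} (l : List α) (h : p a = false) :
    (a :: l).find? p = l.find? p := by
  simp [List.find?, h]

lemma pvFold_step {β : Type} (f : β → Int) (g : β → List (List Int)) :
    ∀ (L : List β) (d0 : Int) (q0 : List (List Int)),
      L.foldl (pvStep f g) (d0, q0) =
        (pvMaxf f L d0,
          if d0 < pvMaxf f L d0 then
            ((L.find? (fun b => f b == pvMaxf f L d0)).map g).getD q0
          else q0) := by
  intro L
  induction L with
  | nil => intro d0 q0; simp [pvMaxf]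
  | cons a t ih =>
    intro d0 q0
    have hcons : pvMaxf f (a :: t) d0 = pvMaxf f t (max d0 (f a)) := by
      simp [pvMaxf, List.foldl_cons]
    by_cases hv : d0 < f a
    · have hstep : pvStep f g (d0, q0) a = (f a, g a) := by simp [pvStep, hv]
      have hmax : max d0 (f a) = f a := max_eq_right hv.le
      rw [List.foldl_cons, hstep, ih (f a) (g a), hcons, hmax]
      by_cases hM2 : f a < pvMaxf f t (f a)
      · have hne : (f a == pvMaxf f t (f a)) = false := by
          simp only [beq_eq_false_iff_ne, ne_eq]; omega
        obtain ⟨b, hb, he⟩ := pvMaxf_exists f t (f a) hM2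
        have hsome : (t.find? (fun b => f b == pvMaxf f t (f a))).isSome := by
          rw [List.find?_isSome]; exact ⟨b, hb, by simp [he]⟩
        obtain ⟨c, hc⟩ := Option.isSome_iff_exists.mp hsome
        rw [pvFind_cons_neg t hne, if_pos hM2, if_pos (lt_trans hv hM2), hc]
        simp
      · have heq : pvMaxf f t (f a) = f a :=
          le_antisymm (not_lt.mp hM2) (pvMaxf_ge_init f t _)
        rw [heq, if_neg (by omega), if_pos hv,
          pvFind_cons_pos t (by simp)]
        simp
    · have hstep : pvStep f g (d0, q0) a = (d0, q0) := by simp [pvStep, hv]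
      have hmax : max d0 (f a) = d0 := max_eq_left (not_lt.mp hv)
      rw [List.foldl_cons, hstep, ih d0 q0, hcons, hmax]
      by_cases hM2 : d0 < pvMaxf f t d0
      · have hne : (f a == pvMaxf f t d0) = false := by
          simp only [beq_eq_false_iff_ne, ne_eq]; omega
        rw [pvFind_cons_neg t hne]
      · simp only [if_neg hM2]

def pvLex (a b : Int × Int) : Prop := a.1 < b.1 ∨ (a.1 = b.1 ∧ a.2 < b.2)

lemma pvFind_first {p : Int × Int → Bool} :
    ∀ {L : List (Int × Int)}, L.Pairwise pvLex → ∀ {b : Int × Int}, b ∈ L → p b = true →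
      (∀ c ∈ L, p c = true → c = b ∨ pvLex b c) → L.find? p = some b := by
  intro L
  induction L with
  | nil => intro _ b hb; cases hb
  | cons a t ih =>
    intro hpw b hb hpb hmin
    rw [List.pairwise_cons] at hpw
    by_cases hpa : p a = true
    · rcases hmin a List.mem_cons_self hpa with h | h
      · subst h; exact pvFind_cons_pos t hpa
      · exfalso
        rcases List.mem_cons.mp hb with hba | hbt
        · subst hba; rcases h with h | h <;> omega
        · have := hpw.1 b hbt
          rcases h with h | h <;> rcases this with h2 | h2 <;> omega
    · have hba : b ≠ a := fun he => hpa (he ▸ hpb)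
      have hbt : b ∈ t := by
        rcases List.mem_cons.mp hb with h | h
        · exact absurd h hba
        · exact h
      rw [pvFind_cons_neg t (by simpa using hpa)]
      exact ih hpw.2 hbt hpb (fun c hc hpc => hmin c (List.mem_cons_of_mem _ hc) hpc)

lemma pvPairs_mem {n i j : Int} : (i, j) ∈ pvPairs n ↔ 0 ≤ i ∧ i < j ∧ j < n := by
  unfold pvPairs
  simp only [List.mem_flatMap, List.mem_map, PySem.List.mem_pyRange_one, Prod.mk.injEq]
  constructor
  · rintro ⟨a, ⟨ha0, ha1⟩, b, ⟨hb0, hb1⟩, rfl, rfl⟩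
    omega
  · rintro ⟨h0, h1, h2⟩
    exact ⟨i, ⟨h0, by omega⟩, j - i - 1, ⟨by omega, by omega⟩, rfl, by omega⟩

lemma pvPairs_sorted (n : Int) : (pvPairs n).Pairwise pvLex := by
  unfold pvPairs
  rw [List.pairwise_flatMap]
  constructor
  · intro a _
    rw [List.pairwise_map]
    exact (PySem.List.pairwise_lt_pyRange_one 0 (n - a - 1)).imp
      (fun h => Or.inr ⟨rfl, by omega⟩)
  · refine (PySem.List.pairwise_lt_pyRange_one 0 (n - 1)).imp ?_
    intro a b hab x hx y hy
    simp only [List.mem_map] at hx hy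
    obtain ⟨ja, _, rfl⟩ := hx
    obtain ⟨jb, _, rfl⟩ := hy
    exact Or.inl hab

lemma pvPairs_nil {n : Int} (h : n ≤ 1) : pvPairs n = [] := by
  unfold pvPairs
  rw [PySem.List.pyRange_one_eq_nil (by omega)]
  rfl

lemma pvPt_getD (hP : List (List Int)) (k : Nat) (hk : k < hP.length) :
    pvPt hP (k : Int) = hP.getD k [] := by
  unfold pvPt
  rw [PySem.List.pyGet?_ofNat hP k hk]
  simp [List.getD_eq_getElem?_getD, List.getElem?_eq_getElem hk]

-- ===== main proof =====
theorem diameterPts_spec : Claim_equal_diameterPts := by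
  unfold Claim_equal_diameterPts
  intro hP _ _
  unfold Spec_diameterPts
  rw [pvA_eq hP, pvFold_step]
  by_cases hn : hP.length < 2
  · rw [pvPairs_nil (by exact_mod_cast by omega : (hP.length : Int) ≤ 1)]
    simp [diameterPts_alt, hn, pvMaxf]
  · -- n ≥ 2
    set xs : List Int := hP.map (fun p => (PySem.List.pyGet? p 0).getD 0) with hxs
    have hlen : xs.length = hP.length := by simp [hxs]
    have hxsne : xs ≠ [] := by
      intro h; rw [h] at hlen; simp at hlen; omega
    obtain ⟨lo, hlo⟩ : ∃ lo, PySem.List.min? xs (fun x => x) = some lo := by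
      cases h : PySem.List.min? xs (fun x => x) with
      | none => exact absurd ((PySem.List.min?_eq_none_iff xs _).mp h) hxsne
      | some m => exact ⟨m, rfl⟩
    obtain ⟨hi, hhi⟩ : ∃ hi, PySem.List.max? xs (fun x => x) = some hi := by
      cases h : PySem.List.max? xs (fun x => x) with
      | none => exact absurd ((PySem.List.max?_eq_none_iff xs _).mp h) hxsne
      | some m => exact ⟨m, rfl⟩
    have hloMin : ∀ y ∈ xs, lo ≤ y := PySem.List.min?_isMin hlo
    have hhiMax : ∀ y ∈ xs, y ≤ hi := PySem.List.max?_isMax hhi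
    have hloMem : lo ∈ xs := PySem.List.min?_mem hlo
    have hhiMem : hi ∈ xs := PySem.List.max?_mem hhi
    have hlohi : lo ≤ hi := hhiMax lo hloMem
    -- proof-side view of xs: total indexing with getD (no embedded bound proofs)
    set X : Nat → Int := fun k => xs.getD k 0 with hXdef
    have hXel : ∀ (k : Nat) (hk : k < xs.length), xs[k]'hk = X k := by
      intro k hk
      simp [hXdef, List.getD_eq_getElem?_getD, List.getElem?_eq_getElem hk]
    have hXmem : ∀ (k : Nat), k < xs.length → X k ∈ xs := by
      intro k hk; rw [← hXel k hk]; exact List.getElem_mem hk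
    have hXlo : ∀ (k : Nat), k < xs.length → lo ≤ X k := fun k hk => hloMin _ (hXmem k hk)
    have hXhi : ∀ (k : Nat), k < xs.length → X k ≤ hi := fun k hk => hhiMax _ (hXmem k hk)
    have hFvalN : ∀ (a b : Nat), a < xs.length → b < xs.length →
        pvF hP ((a : Int), (b : Int)) = |X a - X b| := by
      intro a b ha hb
      unfold pvF pvXI
      simp only
      rw [PySem.List.pyGet?_ofNat hP a (by omega), PySem.List.pyGet?_ofNat hP b (by omega)]
      rw [← hXel a ha, ← hXel b hb]
      simp [hxs]
    have hFle : ∀ c ∈ pvPairs (hP.length : Int), pvF hP c ≤ hi - lo := by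
      rintro ⟨a, b⟩ hc
      obtain ⟨h0, h1, h2⟩ := pvPairs_mem.mp hc
      obtain ⟨a', rfl⟩ : ∃ a' : Nat, a = (a' : Int) := ⟨a.toNat, by omega⟩
      obtain ⟨b', rfl⟩ : ∃ b' : Nat, b = (b' : Int) := ⟨b.toNat, by omega⟩
      have ha' : a' < xs.length := by omega
      have hb' : b' < xs.length := by omega
      rw [hFvalN a' b' ha' hb']
      have c1 := hXlo a' ha'
      have c2 := hXhi a' ha'
      have c3 := hXlo b' hb'
      have c4 := hXhi b' hb'
      rw [abs_le]
      constructor <;> omega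
    by_cases hd : hi - lo = 0
    · -- all x equal: A's fold never fires, B returns (0, [])
      have hM0 : pvMaxf (pvF hP) (pvPairs (hP.length : Int)) 0 = 0 := by
        refine le_antisymm (pvMaxf_le _ 0 le_rfl ?_) (pvMaxf_ge_init _ _ 0)
        intro c hc
        have := hFle c hc
        omega
      rw [hM0]
      simp only [lt_irrefl, if_false]
      simp only [diameterPts_alt, if_neg hn, ← hxs, hlo, hhi]
      simp [hd]
    · have hdpos : 0 < hi - lo := by omega
      -- B's first scan: first extremal index i0
      have hExLo : ∃ x ∈ xs, (x == lo || x == hi) = true := ⟨lo, hloMem, by simp⟩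
      set i0 : Nat := xs.findIdx (fun x => x == lo || x == hi) with hi0
      have hi0lt : i0 < xs.length := List.findIdx_lt_length.mpr hExLo
      have hXi0 : X i0 = lo ∨ X i0 = hi := by
        have h := List.findIdx_getElem (w := hi0lt) (p := fun x => x == lo || x == hi)
        rw [← hXel i0 hi0lt]
        simpa using h
      have hbefore : ∀ k : Nat, k < i0 → X k ≠ lo ∧ X k ≠ hi := by
        intro k hki
        have hk : k < xs.length := by omega
        have h := List.not_of_lt_findIdx (xs := xs) (p := fun x => x == lo || x == hi) hki
        rw [← hXel k hk]
        simpa using h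
      set other : Int := if xs.getD i0 0 == lo then hi else lo with hother
      have hOtherVal : (X i0 = lo ∧ other = hi) ∨ (X i0 = hi ∧ other = lo) := by
        rcases hXi0 with h | h
        · left
          refine ⟨h, ?_⟩
          rw [hother, show xs.getD i0 0 = X i0 from rfl, h]
          simp
        · right
          refine ⟨h, ?_⟩
          have hne : (hi == lo) = false := by
            simp only [beq_eq_false_iff_ne, ne_eq]; omega
          rw [hother, show xs.getD i0 0 = X i0 from rfl, h, hne]
          simp
      have hOtherMem : other ∈ xs := by
        rcases hOtherVal with ⟨_, h⟩ | ⟨_, h⟩ <;> rw [h]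
        · exact hhiMem
        · exact hloMem
      obtain ⟨k, hk, hkval⟩ := List.mem_iff_getElem.mp hOtherMem
      have hkvalX : X k = other := by rw [← hXel k hk]; exact hkval
      have hki0 : i0 < k := by
        rcases Nat.lt_trichotomy k i0 with h | h | h
        · exfalso
          have := hbefore k h
          rcases hOtherVal with ⟨_, ho⟩ | ⟨_, ho⟩ <;> rw [ho] at hkvalX <;> tauto
        · exfalso
          subst h
          rcases hOtherVal with ⟨h1, h2⟩ | ⟨h1, h2⟩ <;> rw [hkvalX, h2] at h1 <;> omega
        · exact h
      have hExOther : ∃ x ∈ xs.drop (i0 + 1), (x == other) = true := by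
        refine ⟨other, ?_, by simp⟩
        have h1 : (xs.drop (i0 + 1))[k - (i0 + 1)]? = some other := by
          rw [List.getElem?_drop, show i0 + 1 + (k - (i0 + 1)) = k by omega,
            List.getElem?_eq_getElem hk, hkval]
        exact List.mem_of_getElem? h1
      set t0 : Nat := (xs.drop (i0 + 1)).findIdx (fun x => x == other) with ht0
      have ht0lt : t0 < (xs.drop (i0 + 1)).length := List.findIdx_lt_length.mpr hExOther
      set j0 : Nat := i0 + 1 + t0 with hj0
      have hj0lt : j0 < xs.length := by
        rw [List.length_drop] at ht0lt; omega
      have hXj0 : X j0 = other := by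
        have hdt := List.findIdx_getElem (w := ht0lt) (p := fun x => x == other)
        have hdteq : (xs.drop (i0 + 1))[t0]'ht0lt = other := by simpa using hdt
        have h1 : xs[j0]? = some other := by
          rw [hj0, ← List.getElem?_drop, List.getElem?_eq_getElem ht0lt, hdteq]
        have h2 : xs[j0]? = some (xs[j0]'hj0lt) := List.getElem?_eq_getElem hj0lt
        rw [h1] at h2
        rw [← hXel j0 hj0lt]
        exact (Option.some.inj h2).symm
      have hmid : ∀ m : Nat, i0 < m → m < j0 → X m ≠ other := by
        intro m h1 h2
        have hm : m < xs.length := by omega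
        have hmt : m - (i0 + 1) < t0 := by omega
        have hmlt : m - (i0 + 1) < (xs.drop (i0 + 1)).length := by
          rw [List.length_drop]; omega
        rw [← hXel m hm]
        intro hcon
        have hq1 : (xs.drop (i0 + 1))[m - (i0 + 1)]? = some other := by
          rw [List.getElem?_drop, show i0 + 1 + (m - (i0 + 1)) = m by omega,
            List.getElem?_eq_getElem hm, hcon]
        have hq2 : (xs.drop (i0 + 1))[m - (i0 + 1)]'hmlt = other := by
          have hq3 := List.getElem?_eq_getElem hmlt
          rw [hq1] at hq3
          exact (Option.some.inj hq3).symm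
        have hno : ((xs.drop (i0 + 1))[m - (i0 + 1)]'hmlt == other) = false :=
          List.not_of_lt_findIdx (xs := xs.drop (i0 + 1)) (p := fun x => x == other) hmt
        rw [hq2] at hno
        simp at hno
      -- the witness pair and its value
      have hi0j0mem : ((i0 : Int), (j0 : Int)) ∈ pvPairs (hP.length : Int) := by
        rw [pvPairs_mem]
        refine ⟨by positivity, ?_, ?_⟩
        · exact_mod_cast (by omega : i0 < j0)
        · exact_mod_cast (by omega : j0 < hP.length)
      have hFij : pvF hP ((i0 : Int), (j0 : Int)) = hi - lo := by
        rw [hFvalN i0 j0 hi0lt hj0lt]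
        rcases hOtherVal with ⟨h1, h2⟩ | ⟨h1, h2⟩ <;> rw [h1, hXj0, h2]
        · rw [abs_sub_comm, abs_of_nonneg (by omega)]
        · rw [abs_of_nonneg (by omega)]
      have hM : pvMaxf (pvF hP) (pvPairs (hP.length : Int)) 0 = hi - lo := by
        refine le_antisymm (pvMaxf_le _ 0 (by omega) hFle) ?_
        calc hi - lo = pvF hP ((i0 : Int), (j0 : Int)) := hFij.symm
          _ ≤ _ := pvMaxf_ge_mem _ hi0j0mem 0
      -- the find? picks exactly (i0, j0)
      have hfind :
          (pvPairs (hP.length : Int)).find? (fun b => pvF hP b == hi - lo)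
            = some ((i0 : Int), (j0 : Int)) := by
        refine pvFind_first (pvPairs_sorted _) hi0j0mem (by simp [hFij]) ?_
        rintro ⟨a, b⟩ hc hpc
        obtain ⟨h0, h1, h2⟩ := pvPairs_mem.mp hc
        obtain ⟨a', rfl⟩ : ∃ a' : Nat, a = (a' : Int) := ⟨a.toNat, by omega⟩
        obtain ⟨b', rfl⟩ : ∃ b' : Nat, b = (b' : Int) := ⟨b.toNat, by omega⟩
        have ha'lt : a' < xs.length := by omega
        have hb'lt : b' < xs.length := by omega
        simp only [beq_iff_eq] at hpc
        rw [hFvalN a' b' ha'lt hb'lt] at hpc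
        have c1 := hXlo a' ha'lt
        have c2 := hXhi a' ha'lt
        have c3 := hXlo b' hb'lt
        have c4 := hXhi b' hb'lt
        have hsplit : (X a' = lo ∧ X b' = hi) ∨ (X a' = hi ∧ X b' = lo) := by
          rcases (abs_eq (by omega : (0 : ℤ) ≤ hi - lo)).mp hpc with h | h
          · exact Or.inr ⟨by omega, by omega⟩
          · exact Or.inl ⟨by omega, by omega⟩
        have hai0 : i0 ≤ a' := by
          by_contra habs
          have := hbefore a' (by omega)
          rcases hsplit with ⟨h, _⟩ | ⟨h, _⟩ <;> tauto
        rcases Nat.lt_or_ge i0 a' with hlt | hge2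
        · refine Or.inr (Or.inl ?_)
          show (i0 : Int) < (a' : Int)
          exact_mod_cast hlt
        · have haeq : a' = i0 := by omega
          subst haeq
          have hbother : X b' = other := by
            rcases hOtherVal with ⟨h1', h2'⟩ | ⟨h1', h2'⟩ <;>
              rcases hsplit with ⟨ha2, hb2⟩ | ⟨ha2, hb2⟩ <;> rw [h2'] <;> omega
          have hbge : j0 ≤ b' := by
            by_contra habs
            have hbi : i0 < b' := by exact_mod_cast h1
            exact hmid b' (by omega) (by omega) hbother
          rcases Nat.eq_or_lt_of_le hbge with heq | hlt'
          · left
            rw [show b' = j0 from heq.symm]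
          · refine Or.inr (Or.inr ⟨rfl, ?_⟩)
            show (j0 : Int) < (b' : Int)
            exact_mod_cast hlt'
      -- assemble
      rw [hM, if_pos hdpos, hfind]
      have hBg : pvG hP ((i0 : Int), (j0 : Int)) = [hP.getD i0 [], hP.getD j0 []] := by
        unfold pvG
        simp only
        rw [pvPt_getD hP i0 (by omega), pvPt_getD hP j0 (by omega)]
      simp only [Option.map_some, Option.getD_some, hBg]
      have hB : diameterPts_alt hP = (hi - lo, [hP.getD i0 [], hP.getD j0 []]) := by
        simp only [diameterPts_alt, if_neg hn, ← hxs, hlo, hhi, Option.getD_some]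
        rw [if_neg hd, ← hi0, ← hother, ← ht0, ← hj0]
      rw [hB]
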